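-- pv_equiv track=rewrite | github.com/ARobicsek/bible-figurative-language | archived_unused_files/create_tag_system.py | determine_target_tags
-- ===== SOURCE A (Python) =====
-- from typing import Dict, List, Tuple
--
-- def determine_target_tags(level_1: str, specific: str, explanation: str) -> List[str]:
--     """Determine multiple target tags based on categorical and textual analysis"""
--     tags = []
--
--     # Base category mapping
--     if level_1 == 'God':
--         tags.append('deity')
--         if specific and 'spirit' in specific.lower():
--             tags.append('spirit_of_god')
--         if specific and any(word in specific.lower() for word in ['presence', 'glory']):
--             tags.append('divine_presence')
--         tags.append('god')
--
--     elif level_1 == 'natural world':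
--         tags.append('natural_world')
--         if specific and any(word in specific.lower() for word in ['sun', 'moon', 'star', 'light']):
--             tags.append('celestial_body')
--         if specific and any(word in specific.lower() for word in ['earth', 'land', 'ground']):
--             tags.append('earth_land')
--         if specific and any(word in specific.lower() for word in ['water', 'sea', 'river']):
--             tags.append('water_element')
--         if specific and any(word in specific.lower() for word in ['creation', 'created', 'things']):
--             tags.append('created_things')
--
--     elif level_1 == 'state of being':
--         tags.append('state_of_being')
--         if specific and any(word in specific.lower() for word in ['marriage', 'marital', 'union']):
--             tags.append('marital_union')
--         if specific and any(word in specific.lower() for word in ['covenant', 'relationship']):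
--             tags.append('covenant_relationship')
--
--     elif level_1 == 'human parts':
--         tags.append('human_parts')
--
--     return tags
-- ===== SOURCE B (Python) =====
-- from typing import Dict, List, Tuple
--
-- # A flat keyword->tag index scanned once against the lowered text; the result is the
-- # category's fixed candidate-tag order filtered by which tags were triggered.
-- _KEYWORD_TAGS = [
--     ('spirit', 'spirit_of_god'),
--     ('presence', 'divine_presence'), ('glory', 'divine_presence'),
--     ('sun', 'celestial_body'), ('moon', 'celestial_body'), ('star', 'celestial_body'), ('light', 'celestial_body'),
--     ('earth', 'earth_land'), ('land', 'earth_land'), ('ground', 'earth_land'),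
--     ('water', 'water_element'), ('sea', 'water_element'), ('river', 'water_element'),
--     ('creation', 'created_things'), ('created', 'created_things'), ('things', 'created_things'),
--     ('marriage', 'marital_union'), ('marital', 'marital_union'), ('union', 'marital_union'),
--     ('covenant', 'covenant_relationship'), ('relationship', 'covenant_relationship'),
-- ]
-- _TAG_ORDER = {
--     'God': ['deity', 'spirit_of_god', 'divine_presence', 'god'],
--     'natural world': ['natural_world', 'celestial_body', 'earth_land', 'water_element', 'created_things'],
--     'state of being': ['state_of_being', 'marital_union', 'covenant_relationship'],
--     'human parts': ['human_parts'],
-- }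
-- _ALWAYS = ['deity', 'god', 'natural_world', 'state_of_being', 'human_parts']
--
-- def determine_target_tags(level_1: str, specific: str, explanation: str) -> List[str]:
--     triggered = []
--     if specific:
--         spec = specific.lower()
--         triggered = [tag for kw, tag in _KEYWORD_TAGS if kw in spec]
--     return [t for t in _TAG_ORDER.get(level_1, []) if t in _ALWAYS or t in triggered]
-- ===== Notes on version B (the rewrite author's own statement) =====
-- stated objective: alternative
-- what changed: Replaces the per-category if/elif ladder of keyword checks by a single global scan of a flat keyword->tag index producing a triggered-tag list, followed by filtering the category's fixed candidate-tag order against unconditional tags and that list.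
import Mathlib
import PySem

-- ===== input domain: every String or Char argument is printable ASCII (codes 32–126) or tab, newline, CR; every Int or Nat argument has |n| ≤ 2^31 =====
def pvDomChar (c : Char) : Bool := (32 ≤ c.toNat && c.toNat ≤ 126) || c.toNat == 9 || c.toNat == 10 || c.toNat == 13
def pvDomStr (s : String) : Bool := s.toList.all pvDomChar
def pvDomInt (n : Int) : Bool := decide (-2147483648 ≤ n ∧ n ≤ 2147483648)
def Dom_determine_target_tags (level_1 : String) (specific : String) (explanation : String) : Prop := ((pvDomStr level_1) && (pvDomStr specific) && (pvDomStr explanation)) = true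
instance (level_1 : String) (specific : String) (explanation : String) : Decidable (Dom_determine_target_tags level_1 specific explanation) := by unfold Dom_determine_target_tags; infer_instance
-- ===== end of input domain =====

-- B replaces A's per-category if/elif ladder by one global scan of a flat keyword->tag
-- index plus a filter of the category's candidate-tag order: an alternative decomposition.


-- ===== PORT A =====
def determine_target_tags (level_1 : String) (specific : String) (explanation : String) : List String :=
  let tags : List String := []
  if level_1 == "God" then
    let tags := tags ++ ["deity"]
    let tags := if (!specific.isEmpty) && PySem.Str.isIn "spirit" (PySem.Str.lower specific) then tags ++ ["spirit_of_god"] else tags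
    let tags := if (!specific.isEmpty) && (["presence", "glory"].any fun w => PySem.Str.isIn w (PySem.Str.lower specific)) then tags ++ ["divine_presence"] else tags
    tags ++ ["god"]
  else if level_1 == "natural world" then
    let tags := tags ++ ["natural_world"]
    let tags := if (!specific.isEmpty) && (["sun", "moon", "star", "light"].any fun w => PySem.Str.isIn w (PySem.Str.lower specific)) then tags ++ ["celestial_body"] else tags
    let tags := if (!specific.isEmpty) && (["earth", "land", "ground"].any fun w => PySem.Str.isIn w (PySem.Str.lower specific)) then tags ++ ["earth_land"] else tags
    let tags := if (!specific.isEmpty) && (["water", "sea", "river"].any fun w => PySem.Str.isIn w (PySem.Str.lower specific)) then tags ++ ["water_element"] else tags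
    let tags := if (!specific.isEmpty) && (["creation", "created", "things"].any fun w => PySem.Str.isIn w (PySem.Str.lower specific)) then tags ++ ["created_things"] else tags
    tags
  else if level_1 == "state of being" then
    let tags := tags ++ ["state_of_being"]
    let tags := if (!specific.isEmpty) && (["marriage", "marital", "union"].any fun w => PySem.Str.isIn w (PySem.Str.lower specific)) then tags ++ ["marital_union"] else tags
    let tags := if (!specific.isEmpty) && (["covenant", "relationship"].any fun w => PySem.Str.isIn w (PySem.Str.lower specific)) then tags ++ ["covenant_relationship"] else tags
    tags
  else if level_1 == "human parts" then
    tags ++ ["human_parts"]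
  else
    tags

-- ===== PORT B =====
-- the module-level flat keyword->tag index of Source B (_KEYWORD_TAGS)
def kwTags : List (String × String) :=
  [ ("spirit", "spirit_of_god"),
    ("presence", "divine_presence"), ("glory", "divine_presence"),
    ("sun", "celestial_body"), ("moon", "celestial_body"), ("star", "celestial_body"), ("light", "celestial_body"),
    ("earth", "earth_land"), ("land", "earth_land"), ("ground", "earth_land"),
    ("water", "water_element"), ("sea", "water_element"), ("river", "water_element"),
    ("creation", "created_things"), ("created", "created_things"), ("things", "created_things"),
    ("marriage", "marital_union"), ("marital", "marital_union"), ("union", "marital_union"),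
    ("covenant", "covenant_relationship"), ("relationship", "covenant_relationship") ]

-- the per-category candidate-tag order of Source B (_TAG_ORDER)
def tagOrder : List (String × List String) :=
  [ ("God", ["deity", "spirit_of_god", "divine_presence", "god"]),
    ("natural world", ["natural_world", "celestial_body", "earth_land", "water_element", "created_things"]),
    ("state of being", ["state_of_being", "marital_union", "covenant_relationship"]),
    ("human parts", ["human_parts"]) ]

-- the unconditional tags of Source B (_ALWAYS)
def alwaysTags : List String := ["deity", "god", "natural_world", "state_of_being", "human_parts"]

def determine_target_tags_alt (level_1 : String) (specific : String) (explanation : String) : List String :=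
  let triggered : List String :=
    if !specific.isEmpty then
      (kwTags.filter (fun p => PySem.Str.isIn p.1 (PySem.Str.lower specific))).map Prod.snd
    else []
  ((PySem.Dict.mk tagOrder).getD level_1 []).filter
    (fun t => alwaysTags.contains t || triggered.contains t)

-- ===== PRECONDITION & SPEC =====
def Spec_determine_target_tags (level_1 : String) (specific : String) (explanation : String) (out : List String) : Prop := out = determine_target_tags_alt level_1 specific explanation
instance (level_1 : String) (specific : String) (explanation : String) (out : List String) : Decidable (Spec_determine_target_tags level_1 specific explanation out) := by unfold Spec_determine_target_tags; infer_instance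

-- ===== CLAIM (what is proved, stated in full; the proofs are below) =====
def Claim_equal_determine_target_tags : Prop := ∀ (level_1 : String) (specific : String) (explanation : String), Dom_determine_target_tags level_1 specific explanation → Spec_determine_target_tags level_1 specific explanation (determine_target_tags level_1 specific explanation)

-- ===== LEMMAS AND PROOFS =====
-- membership of t among the second components of the q-filtered pairs, as a single any-scan
theorem contains_map_filter (xs : List (String × String)) (q : String × String → Bool) (t : String) :
    (((xs.filter q).map Prod.snd).contains t) = xs.any (fun p => q p && p.2 == t) := by
  induction xs with
  | nil => simp
  | cons a xs ih =>
    simp only [List.filter_cons, List.any_cons]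
    by_cases h : q a = true
    · by_cases h2 : t = a.2
      · subst h2; simp [h]
      · simp only [h, if_pos, List.map_cons, List.contains_cons, ih, Bool.true_and,
          beq_eq_false_iff_ne.mpr h2, beq_eq_false_iff_ne.mpr (Ne.symm h2), Bool.false_or]
    · have hb : q a = false := by simpa using h
      rw [if_neg h, ih, hb]
      simp

-- ===== VERDICT (by name: the statement is the Claim_ definition above) =====
set_option maxHeartbeats 1000000 in
theorem determine_target_tags_spec : Claim_equal_determine_target_tags := by
  intro l s e _
  unfold Spec_determine_target_tags determine_target_tags determine_target_tags_alt
  by_cases h1 : l = "God"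
  case pos =>
    subst h1
    by_cases hs : s.isEmpty
    · simp [PySem.Dict.getD, PySem.Dict.get?, tagOrder, alwaysTags, hs]
    · have hs' : (!s.isEmpty) = true := by simp [hs]
      simp only [hs', Bool.true_and, if_true, List.nil_append,
        PySem.Dict.getD, PySem.Dict.get?, tagOrder, List.find?, String.reduceBEq, beq_self_eq_true,
        Option.getD_some, List.filter_cons, List.filter_nil, contains_map_filter]
      simp only [kwTags, alwaysTags, List.any_cons, List.any_nil, List.contains_cons, List.contains_nil]
      simp only [String.reduceBEq, Bool.false_or, Bool.or_false, Bool.and_false,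
        Bool.and_true, if_true, Bool.or_true, beq_self_eq_true, Bool.true_or]
      split_ifs <;> simp_all
  case neg =>
  by_cases h2 : l = "natural world"
  case pos =>
    subst h2
    by_cases hs : s.isEmpty
    · simp [PySem.Dict.getD, PySem.Dict.get?, tagOrder, alwaysTags, hs]
    · have hs' : (!s.isEmpty) = true := by simp [hs]
      simp only [hs', Bool.true_and, if_true, List.nil_append,
        PySem.Dict.getD, PySem.Dict.get?, tagOrder, List.find?, String.reduceBEq, beq_self_eq_true,
        Option.getD_some, List.filter_cons, List.filter_nil, contains_map_filter]
      simp only [kwTags, alwaysTags, List.any_cons, List.any_nil, List.contains_cons, List.contains_nil]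
      simp only [String.reduceBEq, Bool.false_or, Bool.or_false, Bool.and_false,
        Bool.and_true, if_true, Bool.or_true, beq_self_eq_true, Bool.true_or]
      split_ifs <;> simp_all
  case neg =>
  by_cases h3 : l = "state of being"
  case pos =>
    subst h3
    by_cases hs : s.isEmpty
    · simp [PySem.Dict.getD, PySem.Dict.get?, tagOrder, alwaysTags, hs]
    · have hs' : (!s.isEmpty) = true := by simp [hs]
      simp only [hs', Bool.true_and, if_true, List.nil_append,
        PySem.Dict.getD, PySem.Dict.get?, tagOrder, List.find?, String.reduceBEq, beq_self_eq_true,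
        Option.getD_some, List.filter_cons, List.filter_nil, contains_map_filter]
      simp only [kwTags, alwaysTags, List.any_cons, List.any_nil, List.contains_cons, List.contains_nil]
      simp only [String.reduceBEq, Bool.false_or, Bool.or_false, Bool.and_false,
        Bool.and_true, if_true, Bool.or_true, beq_self_eq_true, Bool.true_or]
      split_ifs <;> simp_all
  case neg =>
  by_cases h4 : l = "human parts"
  case pos =>
    subst h4
    simp [PySem.Dict.getD, PySem.Dict.get?, tagOrder, alwaysTags]
  case neg =>
    simp [PySem.Dict.getD, PySem.Dict.get?, tagOrder, List.find?, h1, h2, h3, h4,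
      beq_eq_false_iff_ne.mpr (Ne.symm h1), beq_eq_false_iff_ne.mpr (Ne.symm h2),
      beq_eq_false_iff_ne.mpr (Ne.symm h3), beq_eq_false_iff_ne.mpr (Ne.symm h4)]
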